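-- pv_equiv track=rewrite | github.com/thehalleyyoung/halley-labs | nlp-metamorphic-localizer/benchmarks/meta_rule_learner.py | _topics
-- ===== SOURCE A (Python) =====
-- def _topics(text: str) -> list[str]:
--     topic_kw = {
--         "technology": {"computer", "software", "ai", "algorithm", "model", "data", "gpu", "neural"},
--         "sports": {"game", "team", "player", "score", "match", "championship", "coach"},
--         "politics": {"government", "election", "president", "vote", "policy", "congress"},
--         "science": {"research", "experiment", "hypothesis", "theory", "discovery"},
--     }
--     words = set(text.lower().split())
--     return [t for t, kws in topic_kw.items() if words & kws] or ["general"]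
-- ===== SOURCE B (Python) =====
-- def _topics(text: str) -> list[str]:
--     order = ["technology", "sports", "politics", "science"]
--     index = {
--         "computer": "technology", "software": "technology", "ai": "technology",
--         "algorithm": "technology", "model": "technology", "data": "technology",
--         "gpu": "technology", "neural": "technology",
--         "game": "sports", "team": "sports", "player": "sports", "score": "sports",
--         "match": "sports", "championship": "sports", "coach": "sports",
--         "government": "politics", "election": "politics", "president": "politics",
--         "vote": "politics", "policy": "politics", "congress": "politics",
--         "research": "science", "experiment": "science", "hypothesis": "science",
--         "theory": "science", "discovery": "science",
--     }
--     matched = set()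
--     for w in text.lower().split():
--         t = index.get(w)
--         if t is not None:
--             matched.add(t)
--     return [t for t in order if t in matched] or ["general"]
-- ===== Notes on version B (the rewrite author's own statement) =====
-- stated objective: alternative
-- what changed: Replaces the per-topic set-intersection pass (each topic's whole keyword set intersected with the word set) by a single pass over the words against an inverted keyword->topic index, collecting matched topics in a set and filtering the fixed topic order.
import Mathlib
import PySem

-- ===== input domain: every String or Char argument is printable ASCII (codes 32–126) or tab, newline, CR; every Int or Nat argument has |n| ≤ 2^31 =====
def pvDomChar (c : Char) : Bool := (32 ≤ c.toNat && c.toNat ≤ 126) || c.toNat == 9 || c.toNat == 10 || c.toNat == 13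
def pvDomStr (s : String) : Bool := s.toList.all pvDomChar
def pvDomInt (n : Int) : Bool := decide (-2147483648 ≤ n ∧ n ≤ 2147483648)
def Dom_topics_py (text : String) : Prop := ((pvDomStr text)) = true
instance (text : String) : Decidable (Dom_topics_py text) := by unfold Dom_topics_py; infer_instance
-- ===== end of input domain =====

-- B replaces A's per-topic set intersections by one pass over the words against an inverted keyword->topic index (objective: alternative algorithm, same result).

-- ===== PORT A =====
def topics_py (text : String) : List String :=
  let topic_kw : List (String × PySem.Set String) :=
    [("technology", PySem.Set.ofList ["computer","software","ai","algorithm","model","data","gpu","neural"]),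
     ("sports", PySem.Set.ofList ["game","team","player","score","match","championship","coach"]),
     ("politics", PySem.Set.ofList ["government","election","president","vote","policy","congress"]),
     ("science", PySem.Set.ofList ["research","experiment","hypothesis","theory","discovery"])]
  let words : PySem.Set String := PySem.Set.ofList (PySem.Str.split₀ (PySem.Str.lower text))
  let res := (topic_kw.filter (fun p => !(PySem.Set.inter words p.2).isEmpty)).map Prod.fst
  if res.isEmpty then ["general"] else res

-- ===== PORT B =====
def pvOrder : List String := ["technology", "sports", "politics", "science"]

def pvIndex : PySem.Dict String String := PySem.Dict.mk
  [("computer","technology"),("software","technology"),("ai","technology"),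
   ("algorithm","technology"),("model","technology"),("data","technology"),
   ("gpu","technology"),("neural","technology"),
   ("game","sports"),("team","sports"),("player","sports"),("score","sports"),
   ("match","sports"),("championship","sports"),("coach","sports"),
   ("government","politics"),("election","politics"),("president","politics"),
   ("vote","politics"),("policy","politics"),("congress","politics"),
   ("research","science"),("experiment","science"),("hypothesis","science"),
   ("theory","science"),("discovery","science")]

-- the body of B's 'for w in ...' loop
def pvStep (s : PySem.Set String) (w : String) : PySem.Set String :=
  match pvIndex.get? w with
  | some t => PySem.Set.add s t
  | none => s

def topics_py_alt (text : String) : List String :=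
  let matched : PySem.Set String :=
    (PySem.Str.split₀ (PySem.Str.lower text)).foldl pvStep PySem.Set.empty
  let res := pvOrder.filter (fun t => PySem.Set.contains matched t)
  if res.isEmpty then ["general"] else res

-- ===== PRECONDITION & SPEC =====
def Spec_topics_py (text : String) (out : List String) : Prop := out = topics_py_alt text
instance (text : String) (out : List String) : Decidable (Spec_topics_py text out) := by unfold Spec_topics_py; infer_instance

-- ===== CLAIM (what is proved, stated in full; the proofs are below) =====
def Claim_equal_topics_py : Prop := ∀ (text : String), Dom_topics_py text → Spec_topics_py text (topics_py text)

-- ===== LEMMAS AND PROOFS =====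

-- B's loop collects exactly the topics some word maps to through the index
theorem pv_mem_foldl_step (ws : List String) (s : PySem.Set String) (t : String) :
    t ∈ ws.foldl pvStep s ↔ t ∈ s ∨ ∃ w ∈ ws, pvIndex.get? w = some t := by
  induction ws generalizing s with
  | nil => simp
  | cons w ws ih =>
    simp only [List.foldl_cons, ih, pvStep]
    cases h : pvIndex.get? w
    · simp [h]
    · simp [h, PySem.Set.mem_add]; tauto

-- the inverted index hits a topic exactly on that topic's keywords
theorem pv_idx_tech (w : String) : pvIndex.get? w = some "technology" ↔
    w ∈ (["computer","software","ai","algorithm","model","data","gpu","neural"] : List String) := by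
  simp only [pvIndex, PySem.Dict.get?]
  simp
  constructor
  · rintro ⟨a, h⟩; tauto
  · rintro (rfl|rfl|rfl|rfl|rfl|rfl|rfl|rfl) <;> simp

theorem pv_idx_sports (w : String) : pvIndex.get? w = some "sports" ↔
    w ∈ (["game","team","player","score","match","championship","coach"] : List String) := by
  simp only [pvIndex, PySem.Dict.get?]
  simp
  constructor
  · rintro ⟨a, h⟩; tauto
  · rintro (rfl|rfl|rfl|rfl|rfl|rfl|rfl) <;> simp

theorem pv_idx_politics (w : String) : pvIndex.get? w = some "politics" ↔
    w ∈ (["government","election","president","vote","policy","congress"] : List String) := by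
  simp only [pvIndex, PySem.Dict.get?]
  simp
  constructor
  · rintro ⟨a, h⟩; tauto
  · rintro (rfl|rfl|rfl|rfl|rfl|rfl) <;> simp

theorem pv_idx_science (w : String) : pvIndex.get? w = some "science" ↔
    w ∈ (["research","experiment","hypothesis","theory","discovery"] : List String) := by
  simp only [pvIndex, PySem.Dict.get?]
  simp
  constructor
  · rintro ⟨a, h⟩; tauto
  · rintro (rfl|rfl|rfl|rfl|rfl) <;> simp

-- A's nonempty-intersection test equals B's membership in the collected set
theorem pv_topic_agree (ws : List String) (K : List String) (t : String)
    (hidx : ∀ w, pvIndex.get? w = some t ↔ w ∈ K) :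
    (!(PySem.Set.inter (PySem.Set.ofList ws) (PySem.Set.ofList K)).isEmpty)
      = PySem.Set.contains (ws.foldl pvStep PySem.Set.empty) t := by
  rw [Bool.eq_iff_iff]
  rw [Bool.not_eq_true', List.isEmpty_eq_false_iff]
  rw [PySem.Set.contains_iff _ _, pv_mem_foldl_step]
  constructor
  · intro h
    rcases List.exists_mem_of_ne_nil _ h with ⟨x, hx⟩
    rw [PySem.Set.mem_inter _ _ _] at hx
    exact Or.inr ⟨x, (PySem.Set.mem_ofList _ _).mp hx.1, (hidx x).mpr ((PySem.Set.mem_ofList _ _).mp hx.2)⟩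
  · rintro (h | ⟨w, hw, hwt⟩)
    · simp at h
    · exact List.ne_nil_of_mem
        ((PySem.Set.mem_inter _ _ _).mpr ⟨(PySem.Set.mem_ofList _ _).mpr hw, (PySem.Set.mem_ofList _ _).mpr ((hidx w).mp hwt)⟩)

-- ===== VERDICT (by name: the statement is the Claim_ definition above) =====
theorem topics_py_spec : Claim_equal_topics_py := by
  unfold Claim_equal_topics_py Spec_topics_py
  intro text _
  unfold topics_py topics_py_alt pvOrder
  set ws := PySem.Str.split₀ (PySem.Str.lower text) with hws
  have h1 := pv_topic_agree ws _ _ pv_idx_tech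
  have h2 := pv_topic_agree ws _ _ pv_idx_sports
  have h3 := pv_topic_agree ws _ _ pv_idx_politics
  have h4 := pv_topic_agree ws _ _ pv_idx_science
  simp only [List.filter_cons, List.filter_nil, h1, h2, h3, h4]
  cases PySem.Set.contains (ws.foldl pvStep PySem.Set.empty) "technology" <;>
  cases PySem.Set.contains (ws.foldl pvStep PySem.Set.empty) "sports" <;>
  cases PySem.Set.contains (ws.foldl pvStep PySem.Set.empty) "politics" <;>
  cases PySem.Set.contains (ws.foldl pvStep PySem.Set.empty) "science" <;>
  simp
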